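-- pv_equiv track=rewrite | github.com/felpsg/checkpoint3.py | stack.py | remove_number_stack
-- ===== SOURCE A (Python) =====
-- def remove_number_stack(stack, x):
--     # Cria uma nova pilha
--     new_stack = []
--
--     while stack:
--         # Retira o último elemento da pilha e o salva em uma variável
--         element = stack.pop()
--
--         # Adiciona o número na nova pilha apenas se ele for diferente de X
--         if element != x:
--             new_stack.append(element)
--
--     # Transfere os números da nova pilha para a antiga
--     while new_stack:
--         element = new_stack.pop()
--         stack.append(element)
--
--     # Retorna a pilha
--     return stack
-- ===== SOURCE B (Python) =====
-- def remove_number_stack(stack, x):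
--     # One-pass in-place filter: keep order, mutate the same list object.
--     stack[:] = [e for e in stack if e != x]
--     return stack
-- ===== Notes on version B (the rewrite author's own statement) =====
-- stated objective: simpler
-- what changed: Replaced the two pop-based while-loops (reverse into an auxiliary stack, then reverse back) with a single order-preserving list-comprehension filter assigned in place via slice assignment (one pass, no auxiliary stack, no per-element pop/append calls).
import Mathlib
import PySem

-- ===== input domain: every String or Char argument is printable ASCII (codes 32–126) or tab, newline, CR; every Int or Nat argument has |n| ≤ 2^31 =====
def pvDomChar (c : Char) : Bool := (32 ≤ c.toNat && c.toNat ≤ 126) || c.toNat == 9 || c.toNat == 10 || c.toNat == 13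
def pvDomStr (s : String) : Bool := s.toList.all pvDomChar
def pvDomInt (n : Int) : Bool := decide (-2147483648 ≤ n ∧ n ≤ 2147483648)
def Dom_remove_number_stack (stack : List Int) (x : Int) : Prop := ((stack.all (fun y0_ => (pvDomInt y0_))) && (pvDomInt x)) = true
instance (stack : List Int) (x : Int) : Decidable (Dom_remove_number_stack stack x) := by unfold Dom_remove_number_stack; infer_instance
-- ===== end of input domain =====

-- B replaces A's two pop-based while-loops (reverse into an auxiliary stack, then pop back)
-- with a single order-preserving filter written back in place; equivalence here is about the
-- RETURN value (both Pythons mutate the argument list in place, ending in the same state).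

-- ===== PORT A =====
-- first while-loop: pop from the end of `stack`, append to `new_stack` if ≠ x
def pvLoop1 (x : Int) : List Int → List Int → List Int
  | [], new_stack => new_stack
  | a :: rest, new_stack =>
      let element := (a :: rest).getLast (by simp)
      if element ≠ x then pvLoop1 x (a :: rest).dropLast (new_stack ++ [element])
      else pvLoop1 x (a :: rest).dropLast new_stack
termination_by s _ => s.length
decreasing_by all_goals simp [List.length_dropLast]

-- second while-loop: pop from the end of `new_stack`, append to `stack`
def pvLoop2 : List Int → List Int → List Int
  | [], stack => stack
  | a :: rest, stack => pvLoop2 (a :: rest).dropLast (stack ++ [(a :: rest).getLast (by simp)])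
termination_by ns _ => ns.length
decreasing_by all_goals simp [List.length_dropLast]

def remove_number_stack (stack : List Int) (x : Int) : List Int :=
  pvLoop2 (pvLoop1 x stack []) []

-- ===== PORT B =====
def remove_number_stack_alt (stack : List Int) (x : Int) : List Int :=
  stack.filter (fun e => e != x)

-- ===== PRECONDITION & SPEC =====
def Spec_remove_number_stack (stack : List Int) (x : Int) (out : List Int) : Prop := out = remove_number_stack_alt stack x
instance (stack : List Int) (x : Int) (out : List Int) : Decidable (Spec_remove_number_stack stack x out) := by unfold Spec_remove_number_stack; infer_instance

-- ===== CLAIM (what is proved, stated in full; the proofs are below) =====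
def Claim_equal_remove_number_stack : Prop := ∀ (stack : List Int) (x : Int), Dom_remove_number_stack stack x → Spec_remove_number_stack stack x (remove_number_stack stack x)

-- ===== LEMMAS AND PROOFS =====

theorem pvLoop1_snoc (x a : Int) (s ns : List Int) :
    pvLoop1 x (s ++ [a]) ns = pvLoop1 x s (if a ≠ x then ns ++ [a] else ns) := by
  cases s with
  | nil => simp [pvLoop1]
  | cons b t =>
      rw [List.cons_append, pvLoop1]
      simp only [show b :: (t ++ [a]) = (b :: t) ++ [a] from rfl,
        List.getLast_concat, List.dropLast_concat]
      split_ifs <;> rfl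

theorem pvLoop1_eq (x : Int) (s ns : List Int) :
    pvLoop1 x s ns = ns ++ (s.reverse.filter (fun e => e != x)) := by
  induction s using List.reverseRecOn generalizing ns with
  | nil => simp [pvLoop1]
  | append_singleton s a ih =>
      rw [pvLoop1_snoc]
      by_cases h : a = x <;> simp [h, ih]

theorem pvLoop2_snoc (a : Int) (ns st : List Int) :
    pvLoop2 (ns ++ [a]) st = pvLoop2 ns (st ++ [a]) := by
  cases ns with
  | nil => simp [pvLoop2]
  | cons b t =>
      rw [List.cons_append, pvLoop2]
      simp only [show b :: (t ++ [a]) = (b :: t) ++ [a] from rfl,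
        List.getLast_concat, List.dropLast_concat]

theorem pvLoop2_eq (ns st : List Int) : pvLoop2 ns st = st ++ ns.reverse := by
  induction ns using List.reverseRecOn generalizing st with
  | nil => simp [pvLoop2]
  | append_singleton ns a ih => rw [pvLoop2_snoc, ih]; simp

-- ===== VERDICT (by name: the statement is the Claim_ definition above) =====
theorem remove_number_stack_spec : Claim_equal_remove_number_stack := by
  intro stack x _
  unfold Spec_remove_number_stack remove_number_stack remove_number_stack_alt
  rw [pvLoop1_eq, pvLoop2_eq]
  simp [List.filter_reverse]
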